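-- pv_equiv track=rewrite | github.com/pleabargain/midi_python | main.py | generate_circle_of_fifths_arpeggio
-- ===== SOURCE A (Python) =====
-- def generate_circle_of_fifths_arpeggio(start_note, velocity=64, quarter_duration=480):
--     arpeggios = []
--     for _ in range(12):
--         arpeggios.extend([
--             (start_note, velocity, quarter_duration),
--             (start_note + 4, velocity, quarter_duration),
--             (start_note + 4, velocity, quarter_duration),
--             (start_note + 4, velocity, quarter_duration),
--             (start_note, velocity, quarter_duration),
--         ])
--         start_note = (start_note - 5) % 12 + 60  # Move down a fourth (up a fifth)
--     return arpeggios
-- ===== SOURCE B (Python) =====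
-- def generate_circle_of_fifths_arpeggio(start_note, velocity=64, quarter_duration=480):
--     # Closed form: the k-th root (k >= 1) is (start_note - 5*k) % 12 + 60; k = 0 keeps
--     # the raw start_note.  No running state is carried between iterations.
--     out = []
--     for k in range(12):
--         s = start_note if k == 0 else (start_note - 5 * k) % 12 + 60
--         for off in (0, 4, 4, 4, 0):
--             out.append((s + off, velocity, quarter_duration))
--     return out
-- ===== Notes on version B (the rewrite author's own statement) =====
-- stated objective: alternative
-- what changed: Replaces A's stateful root recurrence (mutating start_note each iteration) by a closed-form formula computing the k-th root directly as (start_note - 5*k) % 12 + 60 (raw start_note for k = 0), so no state is carried between iterations.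
import Mathlib
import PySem

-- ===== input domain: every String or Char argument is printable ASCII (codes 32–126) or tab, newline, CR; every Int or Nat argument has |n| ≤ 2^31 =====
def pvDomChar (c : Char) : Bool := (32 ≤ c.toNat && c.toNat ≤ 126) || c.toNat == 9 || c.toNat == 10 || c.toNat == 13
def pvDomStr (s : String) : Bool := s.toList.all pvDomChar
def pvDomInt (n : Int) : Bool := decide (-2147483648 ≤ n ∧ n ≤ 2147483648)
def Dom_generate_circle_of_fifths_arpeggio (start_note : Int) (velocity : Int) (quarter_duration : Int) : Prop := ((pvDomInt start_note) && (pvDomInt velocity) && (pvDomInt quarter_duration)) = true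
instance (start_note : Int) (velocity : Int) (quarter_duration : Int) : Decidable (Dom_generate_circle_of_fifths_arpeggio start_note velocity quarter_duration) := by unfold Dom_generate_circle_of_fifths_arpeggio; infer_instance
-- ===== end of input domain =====

-- B replaces A's stateful root recurrence by a closed-form formula for the k-th root (objective: alternative).

-- ===== PORT A =====
-- for _ in range(12): extend five tuples; then mutate start_note via (start_note - 5) % 12 + 60
def generate_circle_of_fifths_arpeggio (start_note : Int) (velocity : Int) (quarter_duration : Int) : List (Int × Int × Int) :=
  let st := (PySem.List.pyRange 0 12 1).foldl
    (fun (st : List (Int × Int × Int) × Int) _ =>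
      let (arpeggios, sn) := st
      (arpeggios ++
        [(sn, velocity, quarter_duration),
         (sn + 4, velocity, quarter_duration),
         (sn + 4, velocity, quarter_duration),
         (sn + 4, velocity, quarter_duration),
         (sn, velocity, quarter_duration)],
       PySem.Int.mod (sn - 5) 12 + 60))
    ([], start_note)
  st.1

-- ===== PORT B =====
-- for k in range(12): s = start_note if k == 0 else (start_note - 5*k) % 12 + 60; append five offsets
def generate_circle_of_fifths_arpeggio_alt (start_note : Int) (velocity : Int) (quarter_duration : Int) : List (Int × Int × Int) :=
  (PySem.List.pyRange 0 12 1).foldl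
    (fun (out : List (Int × Int × Int)) k =>
      let s := if k == 0 then start_note else PySem.Int.mod (start_note - 5 * k) 12 + 60
      ([(0 : Int), 4, 4, 4, 0]).foldl
        (fun (out : List (Int × Int × Int)) off =>
          out ++ [(s + off, velocity, quarter_duration)]) out)
    []

-- ===== PRECONDITION & SPEC =====
def Spec_generate_circle_of_fifths_arpeggio (start_note : Int) (velocity : Int) (quarter_duration : Int) (out : List (Int × Int × Int)) : Prop := out = generate_circle_of_fifths_arpeggio_alt start_note velocity quarter_duration
instance (start_note : Int) (velocity : Int) (quarter_duration : Int) (out : List (Int × Int × Int)) : Decidable (Spec_generate_circle_of_fifths_arpeggio start_note velocity quarter_duration out) := by unfold Spec_generate_circle_of_fifths_arpeggio; infer_instance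

-- ===== CLAIM (what is proved, stated in full; the proofs are below) =====
def Claim_equal_generate_circle_of_fifths_arpeggio : Prop := ∀ (start_note : Int) (velocity : Int) (quarter_duration : Int), Dom_generate_circle_of_fifths_arpeggio start_note velocity quarter_duration → Spec_generate_circle_of_fifths_arpeggio start_note velocity quarter_duration (generate_circle_of_fifths_arpeggio start_note velocity quarter_duration)

-- ===== LEMMAS AND PROOFS =====

-- ===== VERDICT (by name: the statement is the Claim_ definition above) =====
theorem generate_circle_of_fifths_arpeggio_spec : Claim_equal_generate_circle_of_fifths_arpeggio := by
  intro sn v d _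
  unfold Spec_generate_circle_of_fifths_arpeggio generate_circle_of_fifths_arpeggio generate_circle_of_fifths_arpeggio_alt
  have h : ∀ a : Int, PySem.Int.mod a 12 = a % 12 := fun a =>
    PySem.Int.mod_eq_emod_of_pos (by norm_num)
  have hr : PySem.List.pyRange 0 12 1 = ([0,1,2,3,4,5,6,7,8,9,10,11] : List Int) := by decide
  rw [hr]
  norm_num [h, List.foldl, Prod.ext_iff]
  omega
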